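/- CodeS.lean -- generated by proofs/c6/mkbytes.py: where every function of jsmn_s.bin is inside the image. -/
import X86.Derived.Prog.Reach
import X86.Derived.Prog.StateSimp
import Prog.Jsmn.JsmnSBytes

namespace X86
namespace JsmnS
open X86.User (CodeAt RegsKept Span FlagsOK Layout toNat_add_ofNat toNat_ofNat_lt' add_ofNat_add)
open JsmnSBytes

set_option maxRecDepth 1000000
set_option maxHeartbeats 4000000

theorem tjs_start_jsmn_code {mem : User.Mem} (h : CodeAt mem 0x100000 image_bytes) : CodeAt mem 0x100000 start_jsmn_bytes :=
  h.at _ 0x0 54 _ (by decide) (by decide) (by decide)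
theorem tjs_jsmn_alloc_token_code {mem : User.Mem} (h : CodeAt mem 0x100000 image_bytes) : CodeAt mem 0x100040 jsmn_alloc_token_bytes :=
  h.at _ 0x40 62 _ (by decide) (by decide) (by decide)
theorem tjs_jsmn_fill_token_code {mem : User.Mem} (h : CodeAt mem 0x100000 image_bytes) : CodeAt mem 0x10007e jsmn_fill_token_bytes :=
  h.at _ 0x7e 16 _ (by decide) (by decide) (by decide)
theorem tjs_jsmn_parse_primitive_code {mem : User.Mem} (h : CodeAt mem 0x100000 image_bytes) : CodeAt mem 0x10008e jsmn_parse_primitive_bytes :=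
  h.at _ 0x8e 198 _ (by decide) (by decide) (by decide)
theorem tjs_jsmn_parse_string_code {mem : User.Mem} (h : CodeAt mem 0x100000 image_bytes) : CodeAt mem 0x100154 jsmn_parse_string_bytes :=
  h.at _ 0x154 341 _ (by decide) (by decide) (by decide)
theorem tjs_jsmn_parse_code {mem : User.Mem} (h : CodeAt mem 0x100000 image_bytes) : CodeAt mem 0x1002a9 jsmn_parse_bytes :=
  h.at _ 0x2a9 901 _ (by decide) (by decide) (by decide)
theorem tjs_jsmn_init_code {mem : User.Mem} (h : CodeAt mem 0x100000 image_bytes) : CodeAt mem 0x10062e jsmn_init_bytes :=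
  h.at _ 0x62e 21 _ (by decide) (by decide) (by decide)
theorem tjs_jsmn_run_code {mem : User.Mem} (h : CodeAt mem 0x100000 image_bytes) : CodeAt mem 0x100643 jsmn_run_bytes :=
  h.at _ 0x643 65 _ (by decide) (by decide) (by decide)
theorem tjs_jsmn_main_code {mem : User.Mem} (h : CodeAt mem 0x100000 image_bytes) : CodeAt mem 0x100684 jsmn_main_bytes :=
  h.at _ 0x684 42 _ (by decide) (by decide) (by decide)
theorem tjs_start_call6_code {mem : User.Mem} (h : CodeAt mem 0x100000 image_bytes) : CodeAt mem 0x1006b0 start_call6_bytes :=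
  h.at _ 0x6b0 75 _ (by decide) (by decide) (by decide)
theorem tjs_rodata_code {mem : User.Mem} (h : CodeAt mem 0x100000 image_bytes) : CodeAt mem 0x100700 rodata_bytes :=
  h.at _ 0x700 400 _ (by decide) (by decide) (by decide)

end JsmnS
end X86
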